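-- pv_equiv track=rewrite | github.com/logpai/loghub-2.0 | benchmark/logparser/LogLSHD/DTW.py | substitute_non_matching
-- ===== SOURCE A (Python) =====
-- def substitute_non_matching(string, common_part):
--     result = []
--     common_idx = 0
--     inside_placeholder = False
--
--     for char in string:
--         if common_idx < len(common_part) and char == common_part[common_idx]:
--             result.append(char)
--             common_idx += 1
--             inside_placeholder = False
--         else:
--             if not inside_placeholder:
--                 result.append("<*>")
--                 inside_placeholder = True
--
--     return ''.join(result)
-- ===== SOURCE B (Python) =====
-- from itertools import groupby
--
--
-- def substitute_non_matching(string, common_part):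
--     # Phase 1: mark each character as matched/unmatched against common_part.
--     mask = []
--     idx = 0
--     for ch in string:
--         if idx < len(common_part) and ch == common_part[idx]:
--             mask.append((ch, True))
--             idx += 1
--         else:
--             mask.append((ch, False))
--     # Phase 2: collapse runs — matched chars are kept, each unmatched run -> '<*>'.
--     out = []
--     for flag, grp in groupby(mask, key=lambda p: p[1]):
--         if flag:
--             out.extend(ch for ch, _ in grp)
--         else:
--             out.append("<*>")
--     return ''.join(out)
-- ===== Notes on version B (the rewrite author's own statement) =====
-- stated objective: alternative
-- what changed: Replaced A's one-pass state machine (pointer plus inside_placeholder flag) by a two-phase decomposition: first build a (char, matched) mask by walking the common_part pointer, then collapse it with itertools.groupby, emitting the chars of matched runs and one '<*>' per unmatched run.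
import Mathlib
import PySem

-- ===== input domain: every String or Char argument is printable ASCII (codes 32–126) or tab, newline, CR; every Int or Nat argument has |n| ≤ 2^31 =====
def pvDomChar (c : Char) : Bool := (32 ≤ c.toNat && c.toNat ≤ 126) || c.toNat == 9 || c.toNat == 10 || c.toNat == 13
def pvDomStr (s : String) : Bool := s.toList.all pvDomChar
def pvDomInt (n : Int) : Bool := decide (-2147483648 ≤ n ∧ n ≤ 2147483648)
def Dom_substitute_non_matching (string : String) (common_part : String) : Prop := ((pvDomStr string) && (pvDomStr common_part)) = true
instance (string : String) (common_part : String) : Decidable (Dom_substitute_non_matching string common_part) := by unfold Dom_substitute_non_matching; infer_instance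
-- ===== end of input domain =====

-- B replaces A's one-pass pointer + inside_placeholder state machine by a two-phase
-- decomposition (build a (char, matched) mask, then collapse runs groupby-style); objective: alternative.

-- ===== PORT A =====
-- one step of A's loop: state = (result, common_idx, inside_placeholder)
def pvAStep (cp : List Char) (st : List String × Nat × Bool) (ch : Char) : List String × Nat × Bool :=
  if st.2.1 < cp.length && cp.getD st.2.1 ' ' == ch then
    (st.1 ++ [String.singleton ch], st.2.1 + 1, false)
  else if st.2.2 then st
  else (st.1 ++ ["<*>"], st.2.1, true)

def substitute_non_matching (string : String) (common_part : String) : String :=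
  String.join (string.toList.foldl (pvAStep common_part.toList) ([], 0, false)).1

-- ===== PORT B =====
-- phase 1 of Source B: one step of the mask-building loop, state = (mask, idx)
def pvBStep (cp : List Char) (st : List (Char × Bool) × Nat) (ch : Char) : List (Char × Bool) × Nat :=
  if st.2 < cp.length && cp.getD st.2 ' ' == ch then
    (st.1 ++ [(ch, true)], st.2 + 1)
  else (st.1 ++ [(ch, false)], st.2)

-- phase 2 of Source B: itertools.groupby over the matched flag, ported by hand as run
-- recursion (exact: a True group contributes each of its chars one by one, a False
-- group contributes a single "<*>" and the rest of that run is skipped)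
def pvCollapse : List (Char × Bool) → List String
  | [] => []
  | (ch, true) :: rest => String.singleton ch :: pvCollapse rest
  | (_, false) :: rest => "<*>" :: pvCollapse (rest.dropWhile (fun p => !p.2))
termination_by l => l.length
decreasing_by
  · simp
  · have := List.length_dropWhile_le (fun p : Char × Bool => !p.2) rest
    simp; omega

def substitute_non_matching_alt (string : String) (common_part : String) : String :=
  String.join (pvCollapse (string.toList.foldl (pvBStep common_part.toList) ([], 0)).1)

-- ===== PRECONDITION & SPEC =====
def Spec_substitute_non_matching (string : String) (common_part : String) (out : String) : Prop := out = substitute_non_matching_alt string common_part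
instance (string : String) (common_part : String) (out : String) : Decidable (Spec_substitute_non_matching string common_part out) := by unfold Spec_substitute_non_matching; infer_instance

-- ===== CLAIM (what is proved, stated in full; the proofs are below) =====
def Claim_equal_substitute_non_matching : Prop := ∀ (string : String) (common_part : String), Dom_substitute_non_matching string common_part → Spec_substitute_non_matching string common_part (substitute_non_matching string common_part)

-- ===== LEMMAS AND PROOFS =====

-- recursive characterisation of B's phase-1 mask
def pvMask (cp : List Char) : List Char → Nat → List (Char × Bool)
  | [], _ => []
  | ch :: l, idx =>
    if idx < cp.length && cp.getD idx ' ' == ch then (ch, true) :: pvMask cp l (idx + 1)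
    else (ch, false) :: pvMask cp l idx

-- collapsing from the middle of a run: inside = true means we are inside a placeholder run
def pvCollapseFrom (inside : Bool) (m : List (Char × Bool)) : List String :=
  if inside then pvCollapse (m.dropWhile (fun p => !p.2)) else pvCollapse m

lemma pvB_fold (cp : List Char) : ∀ (l : List Char) (acc : List (Char × Bool)) (idx : Nat),
    (l.foldl (pvBStep cp) (acc, idx)).1 = acc ++ pvMask cp l idx := by
  intro l
  induction l with
  | nil => intro acc idx; simp [pvMask]
  | cons ch l ih =>
    intro acc idx
    by_cases h : idx < cp.length ∧ cp[idx]?.getD ' ' = ch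
    · obtain ⟨h1, h2⟩ := h
      simp [List.getElem?_eq_getElem h1] at h2
      simp [pvMask, pvBStep, List.getD, h1, h2, ih]
    · simp [pvMask, pvBStep, List.getD, h, ih]

lemma pvA_fold (cp : List Char) : ∀ (l : List Char) (acc : List String) (idx : Nat) (inside : Bool),
    (l.foldl (pvAStep cp) (acc, idx, inside)).1 = acc ++ pvCollapseFrom inside (pvMask cp l idx) := by
  intro l
  induction l with
  | nil => intro acc idx inside; simp [pvMask, pvCollapseFrom, pvCollapse]
  | cons ch l ih =>
    intro acc idx inside
    by_cases h : idx < cp.length ∧ cp[idx]?.getD ' ' = ch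
    · obtain ⟨h1, h2⟩ := h
      simp [List.getElem?_eq_getElem h1] at h2
      have hstep : pvAStep cp (acc, idx, inside) ch = (acc ++ [String.singleton ch], idx + 1, false) := by
        simp [pvAStep, List.getD, h1, h2]
      rw [List.foldl_cons, hstep, ih]
      cases inside <;> simp [pvMask, List.getD, h1, h2, pvCollapseFrom, pvCollapse]
    · cases inside with
      | true =>
        have hstep : pvAStep cp (acc, idx, true) ch = (acc, idx, true) := by
          simp [pvAStep, List.getD, h]
        rw [List.foldl_cons, hstep, ih]
        simp [pvMask, List.getD, h, pvCollapseFrom]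
      | false =>
        have hstep : pvAStep cp (acc, idx, false) ch = (acc ++ ["<*>"], idx, true) := by
          simp [pvAStep, List.getD, h]
        rw [List.foldl_cons, hstep, ih]
        simp [pvMask, List.getD, h, pvCollapseFrom, pvCollapse]

-- ===== VERDICT (by name: the statement is the Claim_ definition above) =====
theorem substitute_non_matching_spec : Claim_equal_substitute_non_matching := by
  intro string common_part _
  unfold Spec_substitute_non_matching substitute_non_matching substitute_non_matching_alt
  rw [pvA_fold, pvB_fold]
  simp [pvCollapseFrom]
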